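-- pv_equiv track=rewrite | github.com/sniped-fr/openshapes | bot/openshapes/vectordb/chroma_integration.py | batch_messages
-- ===== SOURCE A (Python) =====
-- def batch_messages(messages):
--     if not messages:
--         return []
--
--     messages.sort(key=lambda m: m["timestamp"])
--
--     batched_conversations = []
--     current_batch = []
--     last_author = None
--
--     for msg in messages:
--         if last_author != msg["author"] or len(current_batch) >= 5:
--             if current_batch:
--                 batched_conversations.append(current_batch)
--             current_batch = [msg]
--         else:
--             current_batch.append(msg)
--
--         last_author = msg["author"]
--
--     if current_batch:
--         batched_conversations.append(current_batch)
--
--     return batched_conversations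
-- ===== SOURCE B (Python) =====
-- def batch_messages(messages):
--     messages.sort(key=lambda m: m["timestamp"])
--     result = []
--     i = 0
--     n = len(messages)
--     while i < n:
--         author = messages[i]["author"]
--         j = i
--         while j < n and messages[j]["author"] == author:
--             j += 1
--         for k in range(i, j, 5):
--             result.append(messages[k:min(k + 5, j)])
--         i = j
--     return result
-- ===== Notes on version B (the rewrite author's own statement) =====
-- stated objective: alternative
-- what changed: A builds batches in one pass with current_batch/last_author accumulator state; B instead scans for each maximal same-author run and slices it into chunks of at most 5 (group-then-chunk, no running batch state); both sort the list in place first.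
import Mathlib
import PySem

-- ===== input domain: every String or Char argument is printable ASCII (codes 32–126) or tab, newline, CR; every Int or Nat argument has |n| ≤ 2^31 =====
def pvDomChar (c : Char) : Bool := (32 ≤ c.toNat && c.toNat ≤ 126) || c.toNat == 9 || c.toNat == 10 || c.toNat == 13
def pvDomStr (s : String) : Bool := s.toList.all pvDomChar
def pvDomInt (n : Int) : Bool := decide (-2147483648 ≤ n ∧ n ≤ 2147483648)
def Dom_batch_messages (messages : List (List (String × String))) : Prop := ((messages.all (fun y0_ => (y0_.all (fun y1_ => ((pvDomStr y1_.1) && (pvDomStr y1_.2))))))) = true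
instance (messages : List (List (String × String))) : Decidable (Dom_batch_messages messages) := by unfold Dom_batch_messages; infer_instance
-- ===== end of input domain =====

-- B replaces A's one-pass accumulator (current_batch / last_author state) by an explicit
-- "find maximal same-author run, then slice it into chunks of 5" two-level loop; equivalence
-- is about the return value (both A and B also sort the argument in place, the same mutation).

-- dict lookup m[k] (first match); messages are dicts, so keys are distinct and this is exact
def kget (m : List (String × String)) (k : String) : Option String :=
  (m.find? (fun p => p.1 == k)).map (·.2)

-- m["timestamp"] / m["author"] as used under Pre_ (key present; getD is never the default there)
def tsKey (m : List (String × String)) : String := (kget m "timestamp").getD ""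
def aKey (m : List (String × String)) : String := (kget m "author").getD ""

-- ===== PORT A =====
-- the for-loop of A over state (batched_conversations, current_batch, last_author)
def bmLoop (ms : List (List (String × String)))
    (batched : List (List (List (String × String))))
    (cur : List (List (String × String))) (last : Option String) :
    List (List (List (String × String))) :=
  match ms with
  | [] => if cur = [] then batched else batched ++ [cur]
  | m :: rest =>
    let a := aKey m
    if last ≠ some a ∨ 5 ≤ cur.length then
      bmLoop rest (if cur = [] then batched else batched ++ [cur]) [m] (some a)
    else
      bmLoop rest batched (cur ++ [m]) (some a)

def batch_messages (messages : List (List (String × String))) : List (List (List (String × String))) :=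
  if messages = [] then []
  else bmLoop (PySem.List.sorted messages tsKey false) [] [] none

-- ===== PORT B =====
-- run[k:k+5] chunking of one author run (Source B's inner for over range(i, j, 5))
def chunk5 (xs : List (List (String × String))) : List (List (List (String × String))) :=
  if _h : xs = [] then [] else xs.take 5 :: chunk5 (xs.drop 5)
termination_by xs.length
decreasing_by
  simp only [List.length_drop]
  have : 0 < xs.length := List.length_pos_iff.mpr _h
  omega

-- Source B's outer while: maximal consecutive same-author runs of the sorted list
def runsByAuthor (ms : List (List (String × String))) : List (List (List (String × String))) :=
  match ms with
  | [] => []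
  | m :: rest =>
    (m :: rest.takeWhile (fun x => aKey x == aKey m)) ::
      runsByAuthor (rest.dropWhile (fun x => aKey x == aKey m))
termination_by ms.length
decreasing_by
  have := List.length_dropWhile_le (fun x => aKey x == aKey m) rest
  simp only [List.length_cons]
  omega

def batch_messages_alt (messages : List (List (String × String))) : List (List (List (String × String))) :=
  (((runsByAuthor (PySem.List.sorted messages tsKey false)).map chunk5)).flatten

-- ===== PRECONDITION & SPEC =====
-- Pre_ excludes exactly the inputs where A raises KeyError: a message dict missing "timestamp" or "author"
def Pre_batch_messages (messages : List (List (String × String))) : Prop :=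
  ∀ m ∈ messages, (kget m "timestamp").isSome ∧ (kget m "author").isSome
instance (messages : List (List (String × String))) : Decidable (Pre_batch_messages messages) := by
  unfold Pre_batch_messages; infer_instance

def pvWitness_batch_messages : (List (List (String × String))) :=
  [[("timestamp", "2"), ("author", "a")], [("timestamp", "1"), ("author", "a")],
   [("timestamp", "3"), ("author", "b")]]

def Spec_batch_messages (messages : List (List (String × String))) (out : List (List (List (String × String)))) : Prop := out = batch_messages_alt messages
instance (messages : List (List (String × String))) (out : List (List (List (String × String)))) : Decidable (Spec_batch_messages messages out) := by unfold Spec_batch_messages; infer_instance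

-- ===== CLAIM (what is proved, stated in full; the proofs are below) =====
def Claim_equal_batch_messages : Prop := ∀ (messages : List (List (String × String))), Dom_batch_messages messages → Pre_batch_messages messages → Spec_batch_messages messages (batch_messages messages)

-- ===== LEMMAS AND PROOFS =====

def chunksRuns (ms : List (List (String × String))) : List (List (List (String × String))) :=
  ((runsByAuthor ms).map chunk5).flatten

theorem bmLoop_batched (ms : List (List (String × String)))
    (batched : List (List (List (String × String))))
    (cur : List (List (String × String))) (last : Option String) :
    bmLoop ms batched cur last = batched ++ bmLoop ms [] cur last := by
  induction ms generalizing batched cur last with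
  | nil => simp only [bmLoop]; split <;> simp
  | cons m rest ih =>
    simp only [bmLoop]
    split
    · rw [ih, ih (batched := (if cur = [] then ([] : List (List (List (String × String))))
        else [] ++ [cur]))]
      split <;> simp
    · rw [ih]

theorem chunk5_nil : chunk5 [] = [] := by
  rw [chunk5.eq_def]; simp

theorem runsByAuthor_nil : runsByAuthor [] = [] := by
  rw [runsByAuthor.eq_def]

theorem runsByAuthor_cons (m : List (String × String)) (rest : List (List (String × String))) :
    runsByAuthor (m :: rest) =
      (m :: rest.takeWhile (fun x => aKey x == aKey m)) ::
        runsByAuthor (rest.dropWhile (fun x => aKey x == aKey m)) := by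
  rw [runsByAuthor.eq_def]

theorem chunk5_small (xs : List (List (String × String))) (h1 : xs ≠ []) (h2 : xs.length ≤ 5) :
    chunk5 xs = [xs] := by
  rw [chunk5.eq_def, dif_neg h1, List.take_of_length_le h2, List.drop_eq_nil_of_le h2, chunk5_nil]

theorem chunk5_full (cur ys : List (List (String × String))) (h : cur.length = 5) :
    chunk5 (cur ++ ys) = cur :: chunk5 ys := by
  have hne : cur ++ ys ≠ [] := by
    intro hc; apply_fun List.length at hc; simp [h] at hc
  rw [chunk5.eq_def, dif_neg hne, ← h, List.take_left, List.drop_left]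

theorem bmLoop_run (xs : List (List (String × String))) :
    ∀ (cur : List (List (String × String))) (a : String), cur ≠ [] → cur.length ≤ 5 →
    bmLoop xs [] cur (some a) =
      chunk5 (cur ++ xs.takeWhile (fun x => aKey x == a)) ++
        chunksRuns (xs.dropWhile (fun x => aKey x == a)) := by
  induction xs with
  | nil =>
    intro cur a h1 h2
    simp only [bmLoop, List.takeWhile_nil, List.dropWhile_nil, List.append_nil,
      chunk5_small cur h1 h2, if_neg h1, chunksRuns, runsByAuthor_nil]
    simp
  | cons m rest ih =>
    intro cur a h1 h2
    by_cases ha : aKey m = a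
    · have htw : (m :: rest).takeWhile (fun x => aKey x == a) =
        m :: rest.takeWhile (fun x => aKey x == a) := by simp [ha]
      have hdw : (m :: rest).dropWhile (fun x => aKey x == a) =
        rest.dropWhile (fun x => aKey x == a) := by simp [ha]
      rw [htw, hdw]
      by_cases h5 : 5 ≤ cur.length
      · have hlen : cur.length = 5 := le_antisymm h2 h5
        simp only [bmLoop, ha, if_neg h1]
        rw [if_pos (Or.inr h5), List.nil_append, bmLoop_batched,
          ih [m] a (by simp) (by simp)]
        rw [show cur ++ m :: rest.takeWhile (fun x => aKey x == a) =
          cur ++ ([m] ++ rest.takeWhile (fun x => aKey x == a)) by simp,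
          chunk5_full cur _ hlen]
        simp
      · simp only [bmLoop, ha]
        rw [if_neg (by simp [h5]), ih (cur ++ [m]) a (by simp) (by simp; omega)]
        simp
    · have htw : (m :: rest).takeWhile (fun x => aKey x == a) = [] := by
        simp [ha]
      have hdw : (m :: rest).dropWhile (fun x => aKey x == a) = m :: rest := by
        simp [ha]
      rw [htw, hdw]
      simp only [bmLoop]
      rw [if_pos (Or.inl (by simp; exact fun hc => ha hc.symm)), if_neg h1,
        List.nil_append, bmLoop_batched, ih [m] (aKey m) (by simp) (by simp)]
      rw [List.append_nil, chunk5_small cur h1 h2]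
      simp only [chunksRuns, runsByAuthor_cons, List.map_cons, List.flatten_cons]
      simp

theorem bmLoop_eq_chunksRuns (xs : List (List (String × String))) :
    bmLoop xs [] [] none = chunksRuns xs := by
  cases xs with
  | nil => simp [bmLoop, chunksRuns, runsByAuthor_nil]
  | cons m rest =>
    have h0 : bmLoop (m :: rest) [] [] none = bmLoop rest [] [m] (some (aKey m)) := by
      simp [bmLoop]
    rw [h0, bmLoop_run rest [m] (aKey m) (by simp) (by simp)]
    simp only [chunksRuns, runsByAuthor_cons, List.map_cons, List.flatten_cons]
    simp

-- ===== VERDICT (by name: the statement is the Claim_ definition above) =====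
theorem batch_messages_spec : Claim_equal_batch_messages := by
  intro messages _ _
  unfold Spec_batch_messages batch_messages batch_messages_alt
  by_cases h : messages = []
  · subst h
    rw [if_pos rfl,
      show PySem.List.sorted ([] : List (List (String × String))) tsKey false = [] from
        rfl,
      runsByAuthor_nil]
    rfl
  · rw [if_neg h, bmLoop_eq_chunksRuns]; rfl
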